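-- pv_equiv track=rewrite | github.com/6210qwe/leetcode_py | leetcode_solutions/by_id/q1649.py | max_non_overlapping_subarrays
-- ===== SOURCE A (Python) =====
-- from typing import List, Optional
--
-- def max_non_overlapping_subarrays(nums: List[int], target: int) -> int:
--     """
--     函数式接口 - 返回非空不重叠子数组的最大数目，且每个子数组中数字和都为 target。
--     """
--     prefix_sum = 0
--     seen = {0: -1}  # 前缀和为 0 的初始位置
--     count = 0
--     last_end = -1  # 上一个子数组的结束位置
--
--     for i, num in enumerate(nums):
--         prefix_sum += num
--         if prefix_sum - target in seen and seen[prefix_sum - target] >= last_end: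
--             count += 1
--             last_end = i
--         seen[prefix_sum] = i
--
--     return count
-- ===== SOURCE B (Python) =====
-- def max_non_overlapping_subarrays(nums, target):
--     count = 0
--     curr = 0
--     seen = {0}
--     for num in nums:
--         curr += num
--         if curr - target in seen:
--             count += 1
--             curr = 0
--             seen = {0}
--         else:
--             seen.add(curr)
--     return count
-- ===== Notes on version B (the rewrite author's own statement) =====
-- stated objective: idiomatic
-- what changed: Replaced the prefix-index dict plus last_end cursor with a reset-greedy: a window-local running sum and a set of window prefix sums that are both reset to {0}/0 after each matched subarray.
import Mathlib
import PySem

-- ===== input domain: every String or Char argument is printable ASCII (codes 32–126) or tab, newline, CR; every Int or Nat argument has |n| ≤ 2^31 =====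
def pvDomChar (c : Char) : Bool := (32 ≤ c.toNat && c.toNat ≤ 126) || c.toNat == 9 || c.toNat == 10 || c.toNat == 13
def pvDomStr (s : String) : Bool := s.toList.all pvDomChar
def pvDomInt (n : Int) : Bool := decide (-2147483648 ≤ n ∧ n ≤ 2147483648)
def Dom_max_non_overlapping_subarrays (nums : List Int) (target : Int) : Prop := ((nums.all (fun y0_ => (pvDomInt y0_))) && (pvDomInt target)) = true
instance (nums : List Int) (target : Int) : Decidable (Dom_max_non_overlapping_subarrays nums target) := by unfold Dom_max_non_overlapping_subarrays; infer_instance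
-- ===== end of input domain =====

-- B replaces A's global prefix-index dict + last_end cursor by a reset-greedy with a
-- window-local running sum and a set of window prefix sums (objective: more idiomatic).

-- ===== PORT A =====
-- A's loop: state (prefix_sum, seen dict, count, last_end), i is the enumerate index.
def pvALoop (target : Int) (nums : List Int) (i prefix_sum : Int)
    (seen : PySem.Dict Int Int) (count last_end : Int) : Int :=
  match nums with
  | [] => count
  | num :: rest =>
    let ps := prefix_sum + num
    match seen.get? (ps - target) with
    | some j =>
      if j ≥ last_end then
        pvALoop target rest (i + 1) ps (seen.insert ps i) (count + 1) i
      else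
        pvALoop target rest (i + 1) ps (seen.insert ps i) count last_end
    | none => pvALoop target rest (i + 1) ps (seen.insert ps i) count last_end

def max_non_overlapping_subarrays (nums : List Int) (target : Int) : Int :=
  pvALoop target nums 0 0 (PySem.Dict.ofList [(0, -1)]) 0 (-1)

-- ===== PORT B =====
-- B's loop: state (curr, seen set, count); both curr and seen reset after a match.
def pvBLoop (target : Int) (nums : List Int) (curr : Int)
    (seen : PySem.Set Int) (count : Int) : Int :=
  match nums with
  | [] => count
  | num :: rest =>
    let c := curr + num
    if seen.contains (c - target) then
      pvBLoop target rest 0 (PySem.Set.ofList [0]) (count + 1)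
    else
      pvBLoop target rest c (seen.add c) count

def max_non_overlapping_subarrays_alt (nums : List Int) (target : Int) : Int :=
  pvBLoop target nums 0 (PySem.Set.ofList [0]) 0

-- ===== PRECONDITION & SPEC =====
def Spec_max_non_overlapping_subarrays (nums : List Int) (target : Int) (out : Int) : Prop := out = max_non_overlapping_subarrays_alt nums target
instance (nums : List Int) (target : Int) (out : Int) : Decidable (Spec_max_non_overlapping_subarrays nums target out) := by unfold Spec_max_non_overlapping_subarrays; infer_instance

-- ===== CLAIM (what is proved, stated in full; the proofs are below) =====
def Claim_equal_max_non_overlapping_subarrays : Prop := ∀ (nums : List Int) (target : Int), Dom_max_non_overlapping_subarrays nums target → Spec_max_non_overlapping_subarrays nums target (max_non_overlapping_subarrays nums target)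

-- ===== LEMMAS AND PROOFS =====

/-- Core invariant induction: A's state (i, ps, d, count, le) and B's state (curr, s, count)
    simulate each other.  `curr = ps - base` where `base = ps - curr` is the prefix sum at the
    start of the current window; membership in B's set coincides with "key present in A's dict
    with stored index ≥ last_end", shifted by the base. -/
theorem pvLoop_eq (target : Int) (nums : List Int) :
    ∀ (i ps : Int) (d : PySem.Dict Int Int) (count le curr : Int) (s : PySem.Set Int),
      le < i →
      (∀ k j, d.get? k = some j → j < i) →
      (∀ v : Int, v ∈ s ↔ ∃ j, d.get? (v + (ps - curr)) = some j ∧ le ≤ j) →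
      pvALoop target nums i ps d count le = pvBLoop target nums curr s count := by
  induction nums with
  | nil => intros; rfl
  | cons num rest ih =>
    intro i ps d count le curr s hle hbound hmem
    simp only [pvALoop, pvBLoop]
    have hkey : (curr + num - target) + (ps - curr) = ps + num - target := by ring
    have hcond : s.contains (curr + num - target) = true ↔
        ∃ j, d.get? (ps + num - target) = some j ∧ le ≤ j := by
      rw [PySem.Set.contains_iff, hmem, hkey]
    by_cases hc : ∃ j, d.get? (ps + num - target) = some j ∧ le ≤ j
    · obtain ⟨j, hj, hjle⟩ := hc
      rw [hj]
      have hs : s.contains (curr + num - target) = true := hcond.mpr ⟨j, hj, hjle⟩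
      simp only [hs, if_pos (show j ≥ le from hjle), if_true]
      -- match branch: both sides count+1; A sets le' := i and inserts (ps+num, i); B resets.
      apply ih
      · omega
      · intro k j' hk
        rw [PySem.Dict.get?_insert] at hk
        by_cases hkk : k = ps + num
        · simp only [if_pos hkk, Option.some.injEq] at hk
          omega
        · simp only [if_neg hkk] at hk
          have := hbound _ _ hk; omega
      · intro v
        rw [PySem.Set.mem_ofList, List.mem_singleton, PySem.Dict.get?_insert]
        constructor
        · intro hv
          subst hv
          refine ⟨i, ?_, le_refl i⟩
          rw [if_pos (by ring)]
        · rintro ⟨j', hj', hij'⟩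
          by_cases hkk : v + (ps + num - 0) = ps + num
          · omega
          · rw [if_neg hkk] at hj'
            have := hbound _ _ hj'
            omega
    · have hs : s.contains (curr + num - target) = false := by
        rcases Bool.eq_false_or_eq_true (s.contains (curr + num - target)) with h | h
        · exact absurd (hcond.mp h) hc
        · exact h
      have hA : (match d.get? (ps + num - target) with
          | some j => if j ≥ le then
              pvALoop target rest (i + 1) (ps + num) (d.insert (ps + num) i) (count + 1) i
            else
              pvALoop target rest (i + 1) (ps + num) (d.insert (ps + num) i) count le
          | none => pvALoop target rest (i + 1) (ps + num) (d.insert (ps + num) i) count le)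
          = pvALoop target rest (i + 1) (ps + num) (d.insert (ps + num) i) count le := by
        cases hdg : d.get? (ps + num - target) with
        | none => rfl
        | some j =>
          have : ¬ (j ≥ le) := fun h => hc ⟨j, hdg, h⟩
          simp [this]
      rw [hA]
      simp only [hs, Bool.false_eq_true, if_false]
      -- no-match branch: B extends the window, A inserts the new prefix sum.
      apply ih
      · omega
      · intro k j' hk
        rw [PySem.Dict.get?_insert] at hk
        by_cases hkk : k = ps + num
        · simp only [if_pos hkk, Option.some.injEq] at hk; omega
        · simp only [if_neg hkk] at hk
          have := hbound _ _ hk; omega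
      · intro v
        rw [PySem.Set.mem_add, PySem.Dict.get?_insert]
        have hiff : (v + (ps + num - (curr + num)) = ps + num) ↔ v = curr + num := by
          constructor <;> intro h <;> omega
        constructor
        · rintro (hv | hv)
          · obtain ⟨j', hj', hjl⟩ := (hmem v).mp hv
            by_cases hkk : v + (ps + num - (curr + num)) = ps + num
            · exact ⟨i, by rw [if_pos hkk], le_of_lt hle⟩
            · refine ⟨j', ?_, hjl⟩
              rw [if_neg hkk]
              have : v + (ps + num - (curr + num)) = v + (ps - curr) := by ring
              rw [this]; exact hj'
          · subst hv
            exact ⟨i, by rw [if_pos (by ring)], le_of_lt hle⟩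
        · rintro ⟨j', hj', hjl⟩
          by_cases hkk : v + (ps + num - (curr + num)) = ps + num
          · exact Or.inr (hiff.mp hkk)
          · rw [if_neg hkk] at hj'
            have : v + (ps + num - (curr + num)) = v + (ps - curr) := by ring
            rw [this] at hj'
            exact Or.inl ((hmem v).mpr ⟨j', hj', hjl⟩)

-- ===== VERDICT (by name: the statement is the Claim_ definition above) =====
theorem max_non_overlapping_subarrays_spec : Claim_equal_max_non_overlapping_subarrays := by
  intro nums target _
  unfold Spec_max_non_overlapping_subarrays max_non_overlapping_subarrays max_non_overlapping_subarrays_alt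
  have hof : PySem.Dict.ofList [((0:Int), (-1:Int))] = PySem.Dict.mk [((0:Int), (-1:Int))] := rfl
  apply pvLoop_eq
  · omega
  · intro k j hk
    rw [hof, PySem.Dict.get?_mk_cons] at hk
    by_cases h0 : k = 0
    · simp [h0] at hk; omega
    · rw [show ((0:Int) == k) = false by simp [Ne.symm h0], if_neg Bool.false_ne_true] at hk
      rw [show PySem.Dict.mk ([] : List (Int × Int)) = PySem.Dict.empty from rfl,
        PySem.Dict.get?_empty] at hk
      cases hk
  · intro v
    rw [hof, PySem.Set.mem_ofList, List.mem_singleton]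
    constructor
    · intro hv
      subst hv
      refine ⟨-1, ?_, le_refl _⟩
      rw [PySem.Dict.get?_mk_cons]
      norm_num
    · rintro ⟨j, hj, _⟩
      rw [PySem.Dict.get?_mk_cons] at hj
      rw [show v + (0 - 0) = v from by ring] at hj
      by_cases h0 : v = 0
      · exact h0
      · rw [show ((0:Int) == v) = false by simp [Ne.symm h0], if_neg Bool.false_ne_true] at hj
        rw [show PySem.Dict.mk ([] : List (Int × Int)) = PySem.Dict.empty from rfl,
          PySem.Dict.get?_empty] at hj
        cases hj
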